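-- pv_equiv track=rewrite | github.com/Whem/lotteryGuesser | src/LotteryGuesserDjango/processors/variational_autoencoder_prediction.py | _gap_method
-- ===== SOURCE A (Python) =====
-- from typing import List, Tuple, Dict, Optional
--
-- def _gap_method(historical_data: List[List[int]],
--                min_num: int, max_num: int, required_numbers: int) -> List[int]:
--     """Gap alapú módszer"""
--     last_seen = {}
--     for i, draw in enumerate(historical_data):
--         for num in draw:
--             last_seen[num] = i
--
--     gaps = {num: last_seen.get(num, len(historical_data))
--            for num in range(min_num, max_num + 1)}
--
--     return sorted(gaps.keys(), key=lambda x: gaps[x], reverse=True)[:required_numbers]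
-- ===== SOURCE B (Python) =====
-- def _gap_method(historical_data, min_num, max_num, required_numbers):
--     """Gap alapú módszer — bucket (counting) sort by gap instead of a comparison sort"""
--     n = len(historical_data)
--     last_seen = {}
--     for i, draw in enumerate(historical_data):
--         for num in draw:
--             last_seen[num] = i
--     buckets = [[] for _ in range(n + 1)]
--     for num in range(min_num, max_num + 1):
--         buckets[last_seen.get(num, n)].append(num)
--     result = []
--     for bucket in reversed(buckets):
--         result.extend(bucket)
--     return result[:required_numbers]
-- ===== Notes on version B (the rewrite author's own statement) =====
-- stated objective: alternative
-- what changed: Replaces the stable comparison sort over gap keys with a counting/bucket sort: numbers are distributed into gap-indexed buckets in one ascending pass and emitted bucket-by-bucket from the largest gap down, which reproduces the stable reverse-sort tie-break.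
import Mathlib
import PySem

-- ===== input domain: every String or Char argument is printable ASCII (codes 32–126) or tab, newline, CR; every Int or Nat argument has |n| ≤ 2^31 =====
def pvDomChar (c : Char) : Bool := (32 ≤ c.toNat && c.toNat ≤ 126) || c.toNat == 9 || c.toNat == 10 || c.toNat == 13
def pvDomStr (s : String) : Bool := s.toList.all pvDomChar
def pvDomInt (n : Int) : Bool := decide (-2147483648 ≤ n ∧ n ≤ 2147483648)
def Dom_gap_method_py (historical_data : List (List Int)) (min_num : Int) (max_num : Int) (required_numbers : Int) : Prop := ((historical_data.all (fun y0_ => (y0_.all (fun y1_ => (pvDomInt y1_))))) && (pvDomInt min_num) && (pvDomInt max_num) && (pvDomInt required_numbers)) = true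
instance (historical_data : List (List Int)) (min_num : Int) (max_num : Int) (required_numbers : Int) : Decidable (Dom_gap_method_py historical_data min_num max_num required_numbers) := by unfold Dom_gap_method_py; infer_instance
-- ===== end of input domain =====

-- ===== PORT A =====
-- B replaces A's comparison sort by a bucket/counting sort over the gap values; return values proved equal on all of Dom.
def gap_method_py (historical_data : List (List Int)) (min_num : Int) (max_num : Int) (required_numbers : Int) : List Int :=
  let last_seen : PySem.Dict Int Int :=
    (PySem.List.enumerate historical_data 0).foldl
      (fun d p => p.2.foldl (fun d num => d.insert num p.1) d) PySem.Dict.empty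
  let gaps : PySem.Dict Int Int :=
    (PySem.List.pyRange min_num (max_num + 1) 1).foldl
      (fun d num => d.insert num (last_seen.getD num (PySem.List.len historical_data))) PySem.Dict.empty
  -- 'sorted(gaps.keys(), key=lambda x: gaps[x], reverse=True)': as in CPython, the key 'gaps[x]' is
  -- computed once per element (decorate), then the same stable reverse sort runs on the cached keys
  -- (undo by taking .2); x ranges over gaps' own keys, so getD _ 0 is exact for 'gaps[x]'
  let keyed : List (Int × Int) := gaps.keys.map (fun x => (gaps.getD x 0, x))
  PySem.List.slice ((PySem.List.sorted keyed (fun p => p.1) true).map (fun p => p.2)) none (some required_numbers)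

-- ===== PORT B =====
def gap_method_py_alt (historical_data : List (List Int)) (min_num : Int) (max_num : Int) (required_numbers : Int) : List Int :=
  let n : Int := PySem.List.len historical_data
  let last_seen : PySem.Dict Int Int :=
    (PySem.List.enumerate historical_data 0).foldl
      (fun d p => p.2.foldl (fun d num => d.insert num p.1) d) PySem.Dict.empty
  let buckets0 : List (List Int) := List.replicate (n.toNat + 1) []
  -- 'buckets[g].append(num)': g = last_seen.get(num, n) is always in [0, n], so toNat-indexed set is exact
  let buckets : List (List Int) :=
    (PySem.List.pyRange min_num (max_num + 1) 1).foldl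
      (fun b num =>
        let k := (last_seen.getD num n).toNat
        b.set k (b.getD k [] ++ [num])) buckets0
  let result : List Int := buckets.reverse.foldl (fun acc bucket => acc ++ bucket) []
  PySem.List.slice result none (some required_numbers)

-- ===== PRECONDITION & SPEC =====
def Spec_gap_method_py (historical_data : List (List Int)) (min_num : Int) (max_num : Int) (required_numbers : Int) (out : List Int) : Prop := out = gap_method_py_alt historical_data min_num max_num required_numbers
instance (historical_data : List (List Int)) (min_num : Int) (max_num : Int) (required_numbers : Int) (out : List Int) : Decidable (Spec_gap_method_py historical_data min_num max_num required_numbers out) := by unfold Spec_gap_method_py; infer_instance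

-- ===== CLAIM (what is proved, stated in full; the proofs are below) =====
def Claim_equal_gap_method_py : Prop := ∀ (historical_data : List (List Int)) (min_num : Int) (max_num : Int) (required_numbers : Int), Dom_gap_method_py historical_data min_num max_num required_numbers → Spec_gap_method_py historical_data min_num max_num required_numbers (gap_method_py historical_data min_num max_num required_numbers)

-- ===== LEMMAS AND PROOFS =====

-- inserting a constant value i with 0 ≤ i ≤ n for every num of a draw keeps every getD _ n in [0, n]
theorem pv_inner_bounds (n i : Int) (hi : 0 ≤ i ∧ i ≤ n) :
    ∀ (draw : List Int) (d : PySem.Dict Int Int),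
      (∀ j, 0 ≤ d.getD j n ∧ d.getD j n ≤ n) →
      ∀ j, 0 ≤ (draw.foldl (fun d num => d.insert num i) d).getD j n ∧
           (draw.foldl (fun d num => d.insert num i) d).getD j n ≤ n := by
  intro draw
  induction draw with
  | nil => intro d hd j; exact hd j
  | cons a t ih =>
      intro d hd j
      refine ih _ (fun j' => ?_) j
      rw [PySem.Dict.getD_insert]
      split_ifs
      · exact hi
      · exact hd j'

-- the last_seen fold keeps every getD _ n in [0, n]
theorem pv_lastseen_bounds (n : Int) :
    ∀ (l : List (Int × List Int)) (d : PySem.Dict Int Int),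
      (∀ p ∈ l, 0 ≤ p.1 ∧ p.1 ≤ n) →
      (∀ j, 0 ≤ d.getD j n ∧ d.getD j n ≤ n) →
      ∀ j, 0 ≤ (l.foldl (fun d p => p.2.foldl (fun d num => d.insert num p.1) d) d).getD j n ∧
           (l.foldl (fun d p => p.2.foldl (fun d num => d.insert num p.1) d) d).getD j n ≤ n := by
  intro l
  induction l with
  | nil => intro d _ hd j; exact hd j
  | cons p t ih =>
      intro d hl hd j
      exact ih _ (fun q hq => hl q (List.mem_cons_of_mem _ hq))
        (pv_inner_bounds n p.1 (hl p (List.mem_cons_self)) p.2 d hd) j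

-- skip a block whose elements all refuse 'before'
theorem pv_insertBy_append {α : Type} (before : α → α → Bool) (x : α) (as bs : List α)
    (h : ∀ y ∈ as, before x y = false) :
    PySem.List.insertBy before x (as ++ bs) = as ++ PySem.List.insertBy before x bs := by
  induction as with
  | nil => simp
  | cons a t ih =>
      simp only [List.cons_append, PySem.List.insertBy, h a (List.mem_cons_self)]
      simp only [Bool.false_eq_true, if_false]
      rw [ih (fun y hy => h y (List.mem_cons_of_mem _ hy))]

-- insert at the front when every element (in particular the head) accepts 'before'
theorem pv_insertBy_front {α : Type} (before : α → α → Bool) (x : α) (bs : List α)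
    (h : ∀ y ∈ bs, before x y = true) :
    PySem.List.insertBy before x bs = x :: bs := by
  cases bs with
  | nil => rfl
  | cons b t => simp [PySem.List.insertBy, h b (List.mem_cons_self)]

-- flatMap respects pointwise-on-members equality
theorem pv_flatMap_congr {α β : Type} (l : List α) (f g : α → List β)
    (h : ∀ x ∈ l, f x = g x) : l.flatMap f = l.flatMap g := by
  induction l with
  | nil => rfl
  | cons a t ih =>
      simp only [List.flatMap_cons, h a (List.mem_cons_self),
        ih (fun x hx => h x (List.mem_cons_of_mem _ hx))]

-- one stable reverse-insertion step lands at the end of x's bucket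
theorem pv_insert_canon {α : Type} (key : α → Int) (x : α) (p : List α) :
    ∀ (ds : List Int), ds.Pairwise (· > ·) → key x ∈ ds →
      PySem.List.insertBy (fun a b => decide (key b < key a)) x
        (ds.flatMap (fun d => p.filter (fun y => key y == d)))
      = ds.flatMap (fun d => (p ++ [x]).filter (fun y => key y == d)) := by
  intro ds
  induction ds with
  | nil => intro _ hx; cases hx
  | cons d ds' ih =>
      intro hp hx
      have hlt : ∀ d' ∈ ds', d' < d := (List.pairwise_cons.1 hp).1
      have hp' : ds'.Pairwise (· > ·) := (List.pairwise_cons.1 hp).2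
      simp only [List.flatMap_cons]
      by_cases hk : key x = d
      · rw [pv_insertBy_append _ _ _ _ (fun y hy => by
          have hyd : key y = d := by simpa using (List.mem_filter.1 hy).2
          simp [hyd, hk])]
        rw [pv_insertBy_front _ _ _ (fun y hy => by
          rcases List.mem_flatMap.1 hy with ⟨d', hd', hyf⟩
          have hyd : key y = d' := by simpa using (List.mem_filter.1 hyf).2
          simp only [hyd, hk, decide_eq_true_eq]
          exact hlt d' hd')]
        have hrest : ds'.flatMap (fun d' => (p ++ [x]).filter (fun y => key y == d'))
            = ds'.flatMap (fun d' => p.filter (fun y => key y == d')) :=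
          pv_flatMap_congr _ _ _ (fun d' hd' => by
            have : key x ≠ d' := by
              have := hlt d' hd'; omega
            simp [List.filter_append, this])
        rw [hrest]
        simp [List.filter_append, hk]
      · have hx' : key x ∈ ds' := by
          rcases List.mem_cons.1 hx with h | h
          · exact absurd h hk
          · exact h
        have hxd : key x < d := hlt _ hx'
        rw [pv_insertBy_append _ _ _ _ (fun y hy => by
          have hyd : key y = d := by simpa using (List.mem_filter.1 hy).2
          simp only [hyd, decide_eq_false_iff_not]
          omega)]
        rw [ih hp' hx']
        have : (p ++ [x]).filter (fun y => key y == d) = p.filter (fun y => key y == d) := by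
          simp [List.filter_append, hk]
        rw [this]

-- stable reverse sort = concatenation of the key-buckets listed in strictly descending key order
theorem pv_sorted_rev_buckets {α : Type} (key : α → Int) (ds : List Int) (hds : ds.Pairwise (· > ·)) :
    ∀ (nums : List α), (∀ x ∈ nums, key x ∈ ds) →
      PySem.List.sorted nums key true = ds.flatMap (fun d => nums.filter (fun y => key y == d)) := by
  intro nums
  induction nums using List.reverseRecOn with
  | nil =>
      intro _
      rw [show PySem.List.sorted ([] : List α) key true = [] from rfl]
      simp
  | append_singleton p x ih =>
      intro hmem
      rw [PySem.List.sorted_rev_eq_foldl_insertBy, List.foldl_append, List.foldl_cons,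
        List.foldl_nil, ← PySem.List.sorted_rev_eq_foldl_insertBy,
        ih (fun y hy => hmem y (by simp [hy]))]
      exact pv_insert_canon key x p ds hds (hmem x (by simp))

-- the bucket-distribution fold, elementwise
theorem pv_buckets_foldl (key : Int → Int) :
    ∀ (nums : List Int) (bl : List (List Int)),
      (∀ x ∈ nums, 0 ≤ key x ∧ (key x).toNat < bl.length) →
      (nums.foldl (fun b x => b.set (key x).toNat (b.getD (key x).toNat [] ++ [x])) bl).length = bl.length ∧
      ∀ k, (nums.foldl (fun b x => b.set (key x).toNat (b.getD (key x).toNat [] ++ [x])) bl).getD k []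
            = bl.getD k [] ++ nums.filter (fun x => (key x).toNat == k) := by
  intro nums
  induction nums with
  | nil => intro bl _; exact ⟨rfl, fun k => by simp⟩
  | cons x t ih =>
      intro bl h
      have hx := h x (List.mem_cons_self)
      set i := (key x).toNat with hi
      set v := bl.getD i [] ++ [x] with hv
      have hlen : (bl.set i v).length = bl.length := List.length_set ..
      have hset : ∀ k, (bl.set i v).getD k [] = if k = i then v else bl.getD k [] := by
        intro k
        by_cases hki : k = i
        · subst hki
          simp [List.getD_eq_getElem?_getD, List.getElem?_set_self hx.2]
        · simp [List.getD_eq_getElem?_getD, List.getElem?_set_ne (fun h => hki h.symm), hki]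
      have ht : ∀ y ∈ t, 0 ≤ key y ∧ (key y).toNat < (bl.set i v).length := by
        intro y hy
        rw [hlen]
        exact h y (List.mem_cons_of_mem _ hy)
      rcases ih (bl.set i v) ht with ⟨ihlen, ihgetD⟩
      constructor
      · simpa [hlen] using ihlen
      · intro k
        rw [List.foldl_cons, ihgetD k, hset k]
        by_cases hki : k = i
        · subst hki
          simp [hv, hi]
        · have hne : ((key x).toNat == k) = false := by
            rw [← hi]; simpa using fun h => hki h.symm
          simp [hne, hki]

-- a list is the range-indexed map of its own getD
theorem pv_list_eq_map_range {α : Type} (l : List α) (d : α) :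
    (List.range l.length).map (fun k => l.getD k d) = l := by
  apply List.ext_getElem (by simp)
  intro i h1 h2
  simp [List.getD_eq_getElem?_getD, List.getElem?_eq_getElem h2]

-- the two ports agree
theorem pv_main (hd : List (List Int)) (mn mx req : Int) :
    gap_method_py hd mn mx req = gap_method_py_alt hd mn mx req := by
  unfold gap_method_py gap_method_py_alt
  simp only [PySem.List.len_eq]
  set n : Int := (hd.length : Int) with hn
  set ls : PySem.Dict Int Int := (PySem.List.enumerate hd 0).foldl
      (fun d p => p.2.foldl (fun d num => d.insert num p.1) d) PySem.Dict.empty with hls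
  set nums : List Int := PySem.List.pyRange mn (mx + 1) 1 with hnums
  set g : Int → Int := fun x => ls.getD x n with hg
  -- every gap value lies in [0, n]
  have hbounds : ∀ j, 0 ≤ g j ∧ g j ≤ n := by
    intro j
    refine pv_lastseen_bounds n (PySem.List.enumerate hd 0) PySem.Dict.empty ?_ ?_ j
    · intro p hp
      have h1 : p.1 ∈ (PySem.List.enumerate hd 0).map (fun q => q.1) :=
        List.mem_map_of_mem hp
      rw [PySem.List.map_fst_enumerate] at h1
      have h2 := PySem.List.mem_pyRange_one.1 h1
      omega
    · intro j
      rw [PySem.Dict.getD_empty]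
      omega
  -- the gaps dict: items, keys, lookups
  set gaps : PySem.Dict Int Int :=
    nums.foldl (fun d num => d.insert num (ls.getD num n)) PySem.Dict.empty with hgaps
  have hitems : gaps.items = nums.map (fun x => (x, g x)) := by
    rw [hgaps]
    have := PySem.Dict.items_foldl_insert_fresh nums (fun a => a) (fun a => ls.getD a n)
      PySem.Dict.empty (fun a _ => PySem.Dict.contains_empty a)
      (by simpa using PySem.List.nodup_pyRange_one mn (mx + 1))
    simpa using this
  have hkeys : gaps.keys = nums := by
    simp [PySem.Dict.keys, hitems, List.map_map, Function.comp_def]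
  have hknodup : gaps.keys.Nodup := by
    rw [hkeys]; exact PySem.List.nodup_pyRange_one mn (mx + 1)
  have hgetD : ∀ x ∈ nums, gaps.getD x 0 = g x := by
    intro x hx
    exact PySem.Dict.getD_of_mem_items gaps
      (by rw [hitems]; exact List.mem_map_of_mem hx) hknodup 0
  -- the descending list of all possible gap values
  set L : Nat := n.toNat + 1 with hL
  set ds : List Int := ((List.range L).reverse).map (fun k : Nat => Int.ofNat k) with hds
  have hdsdesc : ds.Pairwise (· > ·) := by
    rw [hds]
    have hrev : ((List.range L).reverse).Pairwise (fun a b : Nat => b < a) :=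
      List.pairwise_reverse.2 (by simpa using List.pairwise_lt_range (n := L))
    exact List.Pairwise.map _
      (fun a b h => by simp only [gt_iff_lt, Int.ofNat_eq_natCast]; exact_mod_cast h) hrev
  have hgds : ∀ j, g j ∈ ds := by
    intro j
    rw [hds]
    refine List.mem_map.2 ⟨(g j).toNat, ?_, ?_⟩
    · rw [List.mem_reverse, List.mem_range]
      have := hbounds j
      omega
    · have := (hbounds j).1
      simp [Int.ofNat_eq_natCast]; omega
  -- the decorated list carries the gap as its first component
  set keyed : List (Int × Int) := gaps.keys.map (fun x => (gaps.getD x 0, x)) with hkeyed0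
  have hkeyed : keyed = nums.map (fun x => (g x, x)) := by
    rw [hkeyed0, hkeys]
    exact List.map_congr_left (fun x hx => by rw [hgetD x hx])
  -- A's sorted list is the descending concatenation of buckets
  rw [pv_sorted_rev_buckets (fun p : Int × Int => p.1) ds hdsdesc keyed
      (by
        intro p hp
        rw [hkeyed] at hp
        obtain ⟨x, _, rfl⟩ := List.mem_map.1 hp
        exact hgds x)]
  rw [List.map_flatMap]
  have hA : ∀ d : Int, (keyed.filter (fun p => p.1 == d)).map (fun p => p.2)
      = nums.filter (fun x => g x == d) := by
    intro d
    rw [hkeyed, List.filter_map, List.map_map]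
    simp [Function.comp_def]
  simp only [hA]
  -- B's buckets
  rcases pv_buckets_foldl g nums (List.replicate L []) (by
      intro x _
      have := hbounds x
      constructor
      · exact this.1
      · rw [List.length_replicate]; omega) with ⟨hblen, hbgetD⟩
  set buckets : List (List Int) :=
    nums.foldl (fun b x => b.set (g x).toNat (b.getD (g x).toNat [] ++ [x]))
      (List.replicate L ([] : List Int)) with hbuckets
  rw [PySem.List.foldl_append_eq_flatten buckets.reverse []]
  rw [List.nil_append]
  -- rewrite the flattened reversed buckets as a flatMap over descending indices
  have hblenL : buckets.length = L := by rw [hbuckets, hblen, List.length_replicate]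
  have hbevery : ∀ k, buckets.getD k [] = nums.filter (fun x => (g x).toNat == k) := by
    intro k
    rw [hbuckets, hbgetD k]
    have : (List.replicate L ([] : List Int)).getD k [] = [] := by
      rw [List.getD_eq_getElem?_getD, List.getElem?_replicate]
      split_ifs <;> rfl
    rw [this, List.nil_append]
  have hbeq : buckets = (List.range L).map (fun k => buckets.getD k []) := by
    conv_lhs => rw [← pv_list_eq_map_range buckets []]
    rw [hblenL]
  conv_rhs => rw [hbeq]
  rw [← List.map_reverse, List.flatMap_def.symm]
  -- both sides are flatMaps over (range L).reverse; compare bucket by bucket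
  rw [hds, List.flatMap_map]
  refine congrArg (fun l => PySem.List.slice l none (some req)) ?_
  apply pv_flatMap_congr
  intro k _
  rw [hbevery k]
  apply List.filter_congr
  intro x hx
  have h0 := (hbounds x).1
  obtain ⟨m, hm⟩ := Int.eq_ofNat_of_zero_le h0
  simp [hm, Int.ofNat_eq_natCast]

-- ===== VERDICT (by name: the statement is the Claim_ definition above) =====
theorem gap_method_py_spec : Claim_equal_gap_method_py := by
  unfold Claim_equal_gap_method_py Spec_gap_method_py
  intro hd mn mx req _
  exact pv_main hd mn mx req
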